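-- pv_equiv track=rewrite | github.com/wahbzx/Algorithms | Parsing Algorithms/shunt-yard.py | syntax_checker
-- ===== SOURCE A (Python) =====
-- from collections import deque
--
-- def syntax_checker(tokens):
--   # two consecutive numbers with no op in between
--   # two consecutive operators
--   # Brackets checker close and open needs to match () (()) is okay but (() is not
--   brackets = deque()
--   op = "/+*-^"
--   valid = True
--   if len(tokens) in [0,1]:
--     valid = False
--   else:
--     for i in range(0, len(tokens)-1):
--       # Consecutive num/op check
--       invalid = (not tokens[i].isdigit()) and (not tokens[i] in op) and (not tokens[i] in "()")
--       consecutive = (tokens[i+1] in op and tokens[i] in op) or (tokens[i+1].isdigit() and tokens[i].isdigit())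
--       if consecutive or invalid:
--         valid = False
--         break
--   #Bracket checker
--   others = []
--   for i in range(0,len(tokens)):
--     if tokens[i] in "(":
--       brackets.append(tokens[i])
--     elif tokens[i] == ")":
--       if len(brackets) > 0:
--         brackets.pop()
--       else:
--         valid = False
--     else:
--       others.append(tokens[i])
--   if len(brackets) > 0 or len(others) == 0:
--     valid = False
--   return valid
-- ===== SOURCE B (Python) =====
-- def syntax_checker(tokens):
--     # Single pass with an integer depth counter and a previous-token register,
--     # replacing A's deque stack, `others` list and separate index loops.
--     op = "/+*-^"
--     ok = len(tokens) >= 2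
--     depth = 0
--     seen = False
--     prev = None
--     for t in tokens:
--         if prev is not None:
--             if ((t in op and prev in op) or (t.isdigit() and prev.isdigit())) or \
--                (not prev.isdigit() and prev not in op and prev not in "()"):
--                 ok = False
--         if t in "(":
--             depth += 1
--         elif t == ")":
--             if depth > 0:
--                 depth -= 1
--             else:
--                 ok = False
--         else:
--             seen = True
--         prev = t
--     return ok and depth == 0 and seen
-- ===== Notes on version B (the rewrite author's own statement) =====
-- stated objective: simpler
-- what changed: A's deque stack, accumulated `others` list and two separate index loops (one with a break) are replaced by a single structural pass over the tokens that keeps an integer depth counter, a seen-non-bracket flag and the previous token.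
import Mathlib
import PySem

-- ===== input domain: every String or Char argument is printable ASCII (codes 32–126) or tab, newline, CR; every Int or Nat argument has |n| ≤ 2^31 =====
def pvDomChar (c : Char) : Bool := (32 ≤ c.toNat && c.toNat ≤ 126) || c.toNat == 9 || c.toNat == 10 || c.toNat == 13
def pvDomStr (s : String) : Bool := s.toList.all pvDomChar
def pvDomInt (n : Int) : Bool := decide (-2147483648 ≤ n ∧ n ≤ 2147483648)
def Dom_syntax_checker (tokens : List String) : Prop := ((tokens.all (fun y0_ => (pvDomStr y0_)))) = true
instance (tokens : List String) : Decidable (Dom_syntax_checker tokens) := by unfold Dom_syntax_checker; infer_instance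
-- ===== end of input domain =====

-- B replaces A's deque stack, `others` list and two separate index loops by one structural pass
-- keeping an integer depth, a seen-non-bracket flag and the previous token (objective: simpler).

-- ===== PORT A =====
-- break in the first loop is modelled by the second state component ("broken"): once set, the fold is a no-op
def pvStepA1 (tokens : List String) (st : Bool × Bool) (i : Int) : Bool × Bool :=
  if st.2 then st
  else
    let ti := PySem.List.pyGetD tokens i ""
    let ti1 := PySem.List.pyGetD tokens (i + 1) ""
    let invalid := !PySem.Str.strIsdigit ti && !PySem.Str.isIn ti "/+*-^" && !PySem.Str.isIn ti "()"
    let consecutive := (PySem.Str.isIn ti1 "/+*-^" && PySem.Str.isIn ti "/+*-^") ||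
                       (PySem.Str.strIsdigit ti1 && PySem.Str.strIsdigit ti)
    if consecutive || invalid then (false, true) else st

def pvStepA2 (st : List String × List String × Bool) (t : String) : List String × List String × Bool :=
  if PySem.Str.isIn t "(" then (st.1 ++ [t], st.2.1, st.2.2)
  else if t == ")" then
    if st.1.length > 0 then (st.1.dropLast, st.2.1, st.2.2)
    else (st.1, st.2.1, false)
  else (st.1, st.2.1 ++ [t], st.2.2)

def syntax_checker (tokens : List String) : Bool :=
  let valid := true
  let valid :=
    if PySem.List.len tokens == 0 || PySem.List.len tokens == 1 then false
    else ((PySem.List.pyRange 0 (PySem.List.len tokens - 1) 1).foldl (pvStepA1 tokens) (valid, false)).1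
  let st := (PySem.List.pyRange 0 (PySem.List.len tokens) 1).foldl
      (fun st i => pvStepA2 st (PySem.List.pyGetD tokens i "")) (([] : List String), ([] : List String), valid)
  if st.1.length > 0 || st.2.1.length == 0 then false else st.2.2

-- ===== PORT B =====
-- depth is carried as a Nat: B's counter is only ever incremented, or decremented under its own `depth > 0` guard
def pvStepB (st : Bool × Nat × Bool × Option String) (t : String) : Bool × Nat × Bool × Option String :=
  let ok := match st.2.2.2 with
    | some p =>
        if ((PySem.Str.isIn t "/+*-^" && PySem.Str.isIn p "/+*-^") ||
            (PySem.Str.strIsdigit t && PySem.Str.strIsdigit p)) ||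
           (!PySem.Str.strIsdigit p && !PySem.Str.isIn p "/+*-^" && !PySem.Str.isIn p "()")
        then false else st.1
    | none => st.1
  if PySem.Str.isIn t "(" then (ok, st.2.1 + 1, st.2.2.1, some t)
  else if t == ")" then
    if st.2.1 > 0 then (ok, st.2.1 - 1, st.2.2.1, some t)
    else (false, st.2.1, st.2.2.1, some t)
  else (ok, st.2.1, true, some t)

def syntax_checker_alt (tokens : List String) : Bool :=
  let st := tokens.foldl pvStepB (decide (2 ≤ PySem.List.len tokens), 0, false, none)
  st.1 && st.2.1 == 0 && st.2.2.1

-- ===== PRECONDITION & SPEC =====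
def Spec_syntax_checker (tokens : List String) (out : Bool) : Prop := out = syntax_checker_alt tokens
instance (tokens : List String) (out : Bool) : Decidable (Spec_syntax_checker tokens out) := by unfold Spec_syntax_checker; infer_instance

-- ===== CLAIM (what is proved, stated in full; the proofs are below) =====
def Claim_equal_syntax_checker : Prop := ∀ (tokens : List String), Dom_syntax_checker tokens → Spec_syntax_checker tokens (syntax_checker tokens)

-- ===== LEMMAS AND PROOFS =====

def pvBadPair (p t : String) : Bool :=
  ((PySem.Str.isIn t "/+*-^" && PySem.Str.isIn p "/+*-^") ||
   (PySem.Str.strIsdigit t && PySem.Str.strIsdigit p)) ||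
  (!PySem.Str.strIsdigit p && !PySem.Str.isIn p "/+*-^" && !PySem.Str.isIn p "()")

def pvPairsFrom : Option String → List String → Bool
  | _, [] => true
  | none, t :: ts => pvPairsFrom (some t) ts
  | some p, t :: ts => !pvBadPair p t && pvPairsFrom (some t) ts

def pvBrk : Nat → List String → Bool × Nat
  | d, [] => (true, d)
  | d, t :: ts =>
    if PySem.Str.isIn t "(" then pvBrk (d + 1) ts
    else if t == ")" then
      if d > 0 then pvBrk (d - 1) ts else (false, (pvBrk d ts).2)
    else pvBrk d ts

def pvSeen (ts : List String) : Bool := ts.any (fun t => !PySem.Str.isIn t "(" && !(t == ")"))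

theorem pvStepB_eq (ok : Bool) (dep : Nat) (s : Bool) (prev : Option String) (t : String) :
    pvStepB (ok, dep, s, prev) t =
      (let ok1 := match prev with
        | some p => if pvBadPair p t then false else ok
        | none => ok
       if PySem.Str.isIn t "(" then (ok1, dep + 1, s, some t)
       else if t == ")" then (if dep > 0 then (ok1, dep - 1, s, some t) else (false, dep, s, some t))
       else (ok1, dep, true, some t)) := by
  cases prev <;> rfl

theorem pvFoldB (ts : List String) : ∀ (ok : Bool) (d : Nat) (s : Bool) (prev : Option String),
    ts.foldl pvStepB (ok, d, s, prev) =
      (ok && pvPairsFrom prev ts && (pvBrk d ts).1, (pvBrk d ts).2, s || pvSeen ts,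
       ts.foldl (fun _ t => some t) prev) := by
  induction ts with
  | nil => intro ok d s prev; simp [pvPairsFrom, pvBrk, pvSeen]
  | cons t ts ih =>
    intro ok d s prev
    simp only [List.foldl_cons, pvStepB_eq]
    by_cases h1 : PySem.Str.isIn t "(" = true
    · have h1' : PySem.Chars.isIn t.toList ['('] = true := by simpa using h1
      cases prev with
      | none => simp [pvPairsFrom, pvBrk, pvSeen, h1, h1', ih]
      | some p =>
        cases hb : pvBadPair p t <;>
          simp [pvPairsFrom, pvBrk, pvSeen, h1, h1', hb, ih, Bool.and_assoc]
    · have h1' : PySem.Chars.isIn t.toList ['('] = false := by simpa using h1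
      by_cases h2 : t = ")"
      · have hcl : PySem.Chars.isIn [')'] ['('] = false := by decide
        subst h2
        by_cases h3 : 0 < d
        · cases prev with
          | none => simp [pvPairsFrom, pvBrk, pvSeen, h1, h1', hcl, h3, ih]
          | some p =>
            cases hb : pvBadPair p ")" <;>
              simp [pvPairsFrom, pvBrk, pvSeen, hcl, h3, hb, ih, Bool.and_assoc, Bool.and_left_comm, Bool.and_comm]
        · cases prev with
          | none => simp [pvPairsFrom, pvBrk, pvSeen, h1, h1', hcl, h3, ih]
          | some p =>
            cases hb : pvBadPair p ")" <;>
              simp [pvPairsFrom, pvBrk, pvSeen, hcl, h3, hb, ih, Bool.and_assoc, Bool.and_left_comm, Bool.and_comm]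
      · cases prev with
        | none => simp [pvPairsFrom, pvBrk, pvSeen, h1, h1', h2, ih]
        | some p =>
          cases hb : pvBadPair p t <;>
            simp [pvPairsFrom, pvBrk, pvSeen, h1, h1', h2, hb, ih, Bool.and_assoc]

theorem pvFoldA2 (ts : List String) : ∀ (bs os : List String) (v : Bool),
    (ts.foldl pvStepA2 (bs, os, v)).1.length = (pvBrk bs.length ts).2 ∧
    (ts.foldl pvStepA2 (bs, os, v)).2.1 = os ++ ts.filter (fun t => !PySem.Str.isIn t "(" && !(t == ")")) ∧
    (ts.foldl pvStepA2 (bs, os, v)).2.2 = (v && (pvBrk bs.length ts).1) := by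
  induction ts with
  | nil => intro bs os v; simp [pvBrk]
  | cons t ts ih =>
    intro bs os v
    simp only [List.foldl_cons]
    by_cases h1 : PySem.Str.isIn t "(" = true
    · have h1' : PySem.Chars.isIn t.toList ['('] = true := by simpa using h1
      have hstep : pvStepA2 (bs, os, v) t = (bs ++ [t], os, v) := by simp [pvStepA2, h1']
      obtain ⟨ha, hb2, hc⟩ := ih (bs ++ [t]) os v
      rw [hstep]
      refine ⟨?_, ?_, ?_⟩
      · rw [ha]; simp [pvBrk, h1, h1']
      · rw [hb2]; simp [List.filter_cons, h1, h1']
      · rw [hc]; simp [pvBrk, h1, h1']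
    · have h1' : PySem.Chars.isIn t.toList ['('] = false := by simpa using h1
      by_cases h2 : t = ")"
      · subst h2
        have hcl : PySem.Str.isIn ")" "(" = false := by decide
        have hcl' : PySem.Chars.isIn [')'] ['('] = false := by decide
        by_cases h3 : 0 < bs.length
        · have hstep : pvStepA2 (bs, os, v) ")" = (bs.dropLast, os, v) := by
            simp [pvStepA2, hcl', h3]
          obtain ⟨ha, hb2, hc⟩ := ih bs.dropLast os v
          rw [hstep]
          have hlen : bs.dropLast.length = bs.length - 1 := by simp
          rw [hlen] at ha hc
          refine ⟨?_, ?_, ?_⟩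
          · rw [ha]; simp [pvBrk, hcl, hcl', h3]
          · rw [hb2]; simp [List.filter_cons, hcl, hcl']
          · rw [hc]; simp [pvBrk, hcl, hcl', h3]
        · have hstep : pvStepA2 (bs, os, v) ")" = (bs, os, false) := by
            simp [pvStepA2, hcl', h3]
          obtain ⟨ha, hb2, hc⟩ := ih bs os false
          rw [hstep]
          refine ⟨?_, ?_, ?_⟩
          · rw [ha]; simp [pvBrk, hcl, hcl', h3]
          · rw [hb2]; simp [List.filter_cons, hcl, hcl']
          · rw [hc]; simp [pvBrk, hcl, hcl', h3]
      · have hstep : pvStepA2 (bs, os, v) t = (bs, os ++ [t], v) := by simp [pvStepA2, h1', h2]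
        obtain ⟨ha, hb2, hc⟩ := ih bs (os ++ [t]) v
        rw [hstep]
        refine ⟨?_, ?_, ?_⟩
        · rw [ha]; simp [pvBrk, h1, h1', h2]
        · rw [hb2]; simp [List.filter_cons, h1, h1', h2]
        · rw [hc]; simp [pvBrk, h1, h1', h2]

theorem pvA1frozen (tokens : List String) (is : List Int) (st : Bool × Bool) (h : st.2 = true) :
    is.foldl (pvStepA1 tokens) st = st := by
  induction is with
  | nil => rfl
  | cons i is ih => simp [pvStepA1, h, ih]

theorem pvStepA1_eq (tokens : List String) (st : Bool × Bool) (i : Int) :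
    pvStepA1 tokens st i =
      (if st.2 then st
       else if pvBadPair (PySem.List.pyGetD tokens i "") (PySem.List.pyGetD tokens (i + 1) "")
            then (false, true) else st) := rfl

theorem pvFoldA1 (tokens : List String) (is : List Int) : ∀ (v : Bool),
    (is.foldl (pvStepA1 tokens) (v, false)).1 =
      (v && is.all (fun i => !pvBadPair (PySem.List.pyGetD tokens i "") (PySem.List.pyGetD tokens (i + 1) ""))) := by
  induction is with
  | nil => intro v; simp
  | cons i is ih =>
    intro v
    simp only [List.foldl_cons, pvStepA1_eq]
    cases hb : pvBadPair (PySem.List.pyGetD tokens i "") (PySem.List.pyGetD tokens (i + 1) "")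
    · simp [hb, ih]
    · rw [if_neg (by simp), if_pos rfl, pvA1frozen tokens is (false, true) rfl]
      simp [hb]

theorem pvRangePairsNat (ts : List String) : ∀ (p : String),
    ((List.range ts.length).all
      (fun k => !pvBadPair ((p :: ts).getD k "") ((p :: ts).getD (k + 1) ""))) = pvPairsFrom (some p) ts := by
  induction ts with
  | nil => intro p; simp [pvPairsFrom]
  | cons t ts ih =>
    intro p
    rw [show (t :: ts).length = ts.length + 1 from rfl, List.range_succ_eq_map, List.all_cons,
      List.all_map]
    have hz : ((fun k => !pvBadPair ((p :: t :: ts).getD k "") ((p :: t :: ts).getD (k + 1) "")) ∘ Nat.succ)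
        = (fun k => !pvBadPair ((t :: ts).getD k "") ((t :: ts).getD (k + 1) "")) := by
      funext k
      simp [Function.comp]
    rw [hz, ih t]
    simp [pvPairsFrom, List.getD]

theorem pvFilterLen {α : Type} (f : α → Bool) (ts : List α) :
    ((ts.filter f).length == 0) = !ts.any f := by
  induction ts with
  | nil => simp
  | cons t ts ih => cases h : f t <;> simp [h, ih]

theorem pvRangeAll (tokens : List String) :
    (PySem.List.pyRange 0 ((tokens.length : Int) - 1) 1).all
      (fun i => !pvBadPair (PySem.List.pyGetD tokens i "") (PySem.List.pyGetD tokens (i + 1) ""))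
      = pvPairsFrom none tokens := by
  cases tokens with
  | nil => rw [PySem.List.pyRange_one_eq_nil (by simp)]; simp [pvPairsFrom]
  | cons t ts =>
    have h : ((t :: ts).length : Int) - 1 = ((ts.length : Nat) : Int) := by
      push_cast [List.length_cons]; ring
    rw [h, PySem.List.pyRange_zero_natCast, List.all_map]
    have hz : ((fun i => !pvBadPair (PySem.List.pyGetD (t :: ts) i "") (PySem.List.pyGetD (t :: ts) (i + 1) ""))
          ∘ (fun k : Nat => (k : Int)))
        = (fun k : Nat => !pvBadPair ((t :: ts).getD k "") ((t :: ts).getD (k + 1) "")) := by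
      funext k
      have hk1 : ((k : Int) + 1) = ((k + 1 : Nat) : Int) := by push_cast; ring
      show (!pvBadPair (PySem.List.pyGetD (t :: ts) ((k : Int)) "")
        (PySem.List.pyGetD (t :: ts) ((k : Int) + 1) "")) = _
      rw [hk1, PySem.List.pyGetD_natCast, PySem.List.pyGetD_natCast]
    rw [hz, pvRangePairsNat ts t]
    simp [pvPairsFrom]

theorem pvA2final (tokens : List String) (v : Bool) :
    (let st := (PySem.List.pyRange 0 (PySem.List.len tokens) 1).foldl
        (fun st i => pvStepA2 st (PySem.List.pyGetD tokens i "")) (([] : List String), ([] : List String), v)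
     if st.1.length > 0 || st.2.1.length == 0 then false else st.2.2) =
    (if (pvBrk 0 tokens).2 > 0 || !pvSeen tokens then false else (v && (pvBrk 0 tokens).1)) := by
  simp only [PySem.List.foldl_pyRange_zero_pyGetD]
  obtain ⟨ha, hb2, hc⟩ := pvFoldA2 tokens [] [] v
  rw [ha, hb2, hc]
  rw [show ([] : List String) ++ tokens.filter (fun t => !PySem.Str.isIn t "(" && !(t == ")"))
        = tokens.filter (fun t => !PySem.Str.isIn t "(" && !(t == ")")) from List.nil_append _]
  rw [pvFilterLen]
  rfl

theorem syntax_checker_spec : Claim_equal_syntax_checker := by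
  intro tokens _
  show syntax_checker tokens = syntax_checker_alt tokens
  have hv : (if PySem.List.len tokens == 0 || PySem.List.len tokens == 1 then false
        else ((PySem.List.pyRange 0 (PySem.List.len tokens - 1) 1).foldl (pvStepA1 tokens) (true, false)).1)
      = (if PySem.List.len tokens == 0 || PySem.List.len tokens == 1 then false
        else pvPairsFrom none tokens) := by
    rw [pvFoldA1]
    have hlen : PySem.List.len tokens = ((tokens.length : Int)) := by simp
    rw [hlen, pvRangeAll]
    simp
  have hA : syntax_checker tokens =
      (if (pvBrk 0 tokens).2 > 0 || !pvSeen tokens then false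
       else ((if PySem.List.len tokens == 0 || PySem.List.len tokens == 1 then false
              else ((PySem.List.pyRange 0 (PySem.List.len tokens - 1) 1).foldl
                (pvStepA1 tokens) (true, false)).1) && (pvBrk 0 tokens).1)) :=
    pvA2final tokens _
  rw [hv] at hA
  have hB : syntax_checker_alt tokens =
      ((decide (2 ≤ PySem.List.len tokens) && pvPairsFrom none tokens && (pvBrk 0 tokens).1) &&
       ((pvBrk 0 tokens).2 == 0) && (false || pvSeen tokens)) := by
    simp only [syntax_checker_alt]
    rw [pvFoldB tokens (decide (2 ≤ PySem.List.len tokens)) 0 false none]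
  rw [hA, hB]
  have hlen : PySem.List.len tokens = ((tokens.length : Int)) := by simp
  rw [hlen]
  by_cases h2 : 2 ≤ tokens.length
  · have hg : (((tokens.length : Int) == 0) || ((tokens.length : Int) == 1)) = false := by
      simp only [Bool.or_eq_false_iff, beq_eq_false_iff_ne, ne_eq]
      omega
    have hd : decide (2 ≤ ((tokens.length : Int))) = true := by
      simp only [decide_eq_true_eq]
      omega
    rw [hg, hd]
    rcases Nat.eq_zero_or_pos (pvBrk 0 tokens).2 with hk | hk
    · cases hs : pvSeen tokens
      · simp [hk, hs]
      · simp [hk]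
    · have hz : ((pvBrk 0 tokens).2 == 0) = false := by
        simp only [beq_eq_false_iff_ne, ne_eq]
        omega
      simp [hz, hk]
  · have hg : (((tokens.length : Int) == 0) || ((tokens.length : Int) == 1)) = true := by
      simp only [Bool.or_eq_true, beq_iff_eq]
      omega
    have hd : decide (2 ≤ ((tokens.length : Int))) = false := by
      simp only [decide_eq_false_iff_not]
      omega
    rw [hg, hd]
    simp
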